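-- pv_equiv track=rewrite | github.com/stefan-matcovici/Numerical-Calculus--Homework | Homework3/SparseMatrix.py | get_index_of_insertion
-- ===== SOURCE A (Python) =====
-- def get_index_of_insertion(line, column):
--     size = len(line)
--
--     if size == 0:
--         return 0
--
--     left = 0
--     right = size - 1
--     mid = 0
--     while left < right:
--         mid = (left + right) // 2
--         if line[mid][1] == column:
--             return mid + 1
--
--         if column < line[mid][1]:
--             right = mid - 1
--         else:
--             left = mid + 1
--
--     return left + 1 if column > line[left][1] else left
-- ===== SOURCE B (Python) =====
-- def get_index_of_insertion(line, column):
--     # offset+width formulation: the interval is [lo, lo+width], kept in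
--     # non-negative arithmetic; mid is lo + width//2.
--     n = len(line)
--     if n == 0:
--         return 0
--
--     def go(lo, width):
--         if width == 0:
--             return lo + 1 if column > line[lo][1] else lo
--         half = width // 2
--         v = line[lo + half][1]
--         if v == column:
--             return lo + half + 1
--         if column < v:
--             return go(lo, half - 1 if half > 0 else 0)
--         return go(lo + half + 1, width - half - 1)
--
--     return go(0, n - 1)
-- ===== Notes on version B (the rewrite author's own statement) =====
-- stated objective: alternative
-- what changed: A's iterative left/right binary-search loop is re-decomposed as a recursive helper over an offset+width interval kept in non-negative arithmetic (mid = lo + width//2, shrink the width), preserving the exact search path and A's quirky mid+1-on-match and boundary returns.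
import Mathlib
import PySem

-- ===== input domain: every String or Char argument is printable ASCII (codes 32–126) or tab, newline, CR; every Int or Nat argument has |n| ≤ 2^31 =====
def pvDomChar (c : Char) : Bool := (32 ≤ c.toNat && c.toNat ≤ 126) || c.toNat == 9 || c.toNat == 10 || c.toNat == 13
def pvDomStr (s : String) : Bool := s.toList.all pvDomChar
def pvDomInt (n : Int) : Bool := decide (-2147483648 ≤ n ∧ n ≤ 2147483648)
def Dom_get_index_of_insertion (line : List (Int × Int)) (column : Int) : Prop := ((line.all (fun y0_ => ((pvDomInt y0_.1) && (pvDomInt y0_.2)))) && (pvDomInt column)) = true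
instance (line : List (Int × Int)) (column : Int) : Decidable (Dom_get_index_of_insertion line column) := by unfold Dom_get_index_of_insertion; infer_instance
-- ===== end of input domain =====

-- B recasts A's left/right binary-search loop as recursion on an offset+width interval in non-negative (Nat) arithmetic; same values, different decomposition (objective: alternative).


-- ===== PORT A =====
-- A's while loop, state (left, right); the fuel only makes the recursion structural (line.length
-- steps always suffice: the interval shrinks every iteration), and the indexings are in range when
-- called from the entry point.
def pvLoopA (line : List (Int × Int)) (column : Int) : Nat → Int → Int → Int
  | 0, _, _ => 0
  | fuel + 1, left, right =>
    if left < right then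
      let mid := PySem.Int.floordiv (left + right) 2
      if (PySem.List.pyGetD line mid (0, 0)).2 = column then mid + 1
      else if column < (PySem.List.pyGetD line mid (0, 0)).2 then
        pvLoopA line column fuel left (mid - 1)
      else
        pvLoopA line column fuel (mid + 1) right
    else
      if column > (PySem.List.pyGetD line left (0, 0)).2 then left + 1 else left

def get_index_of_insertion (line : List (Int × Int)) (column : Int) : Int :=
  let size : Int := line.length
  if size = 0 then 0
  else pvLoopA line column line.length 0 (size - 1)

-- ===== PORT B =====
-- Source B's helper go(lo, width): the interval is [lo, lo+width] in non-negative arithmetic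
-- ('half - 1 if half > 0 else 0' is Nat truncated subtraction; fuel as above, width+1 steps suffice).
def pvGoB (line : List (Int × Int)) (column : Int) : Nat → Nat → Nat → Int
  | 0, _, _ => 0
  | fuel + 1, lo, width =>
    if width = 0 then
      if column > (line.getD lo (0, 0)).2 then (lo : Int) + 1 else (lo : Int)
    else
      let half := width / 2
      let v := (line.getD (lo + half) (0, 0)).2
      if v = column then ((lo + half : Nat) : Int) + 1
      else if column < v then pvGoB line column fuel lo (half - 1)
      else pvGoB line column fuel (lo + half + 1) (width - half - 1)

def get_index_of_insertion_alt (line : List (Int × Int)) (column : Int) : Int :=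
  if line.length = 0 then 0
  else pvGoB line column line.length 0 (line.length - 1)

-- ===== PRECONDITION & SPEC =====
def Spec_get_index_of_insertion (line : List (Int × Int)) (column : Int) (out : Int) : Prop := out = get_index_of_insertion_alt line column
instance (line : List (Int × Int)) (column : Int) (out : Int) : Decidable (Spec_get_index_of_insertion line column out) := by unfold Spec_get_index_of_insertion; infer_instance

-- ===== CLAIM (what is proved, stated in full; the proofs are below) =====
def Claim_equal_get_index_of_insertion : Prop := ∀ (line : List (Int × Int)) (column : Int), Dom_get_index_of_insertion line column → Spec_get_index_of_insertion line column (get_index_of_insertion line column)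

-- ===== LEMMAS AND PROOFS =====
-- when the loop condition fails, A's loop returns its boundary expression
theorem pvLoopA_stop (line : List (Int × Int)) (column : Int) (fuel : Nat) (left right : Int) (h : ¬ left < right) :
    pvLoopA line column (fuel + 1) left right
      = if column > (PySem.List.pyGetD line left (0, 0)).2 then left + 1 else left := by
  rw [pvLoopA]; simp only [if_neg h]

theorem pvGoB_zero (line : List (Int × Int)) (column : Int) (fuel lo : Nat) :
    pvGoB line column (fuel + 1) lo 0
      = if column > (line.getD lo (0, 0)).2 then (lo : Int) + 1 else (lo : Int) := by
  rw [pvGoB]; simp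

theorem pvLoopA_eq_pvGoB (line : List (Int × Int)) (column : Int) :
    ∀ (fuel width lo : Nat), width < fuel → lo + width < line.length →
      pvLoopA line column fuel (lo : Int) ((lo : Int) + (width : Int)) = pvGoB line column fuel lo width := by
  intro fuel
  induction fuel with
  | zero => intro width lo hf _; omega
  | succ f ih =>
    intro width lo hf hrange
    by_cases hw : width = 0
    · subst hw
      rw [pvLoopA_stop line column f _ _ (by omega), pvGoB_zero]
      simp [PySem.List.pyGetD_natCast]
    · have hlt : (lo : Int) < (lo : Int) + (width : Int) := by omega
      rw [pvLoopA]
      simp only [if_pos hlt]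
      have hmid : PySem.Int.floordiv ((lo : Int) + ((lo : Int) + (width : Int))) 2
          = ((lo + width / 2 : Nat) : Int) := by
        rw [PySem.Int.floordiv_eq_ediv_of_pos (by omega)]; omega
      rw [pvGoB]
      simp only [if_neg hw, hmid, PySem.List.pyGetD_natCast]
      by_cases heq : (line.getD (lo + width / 2) (0, 0)).2 = column
      · rw [if_pos heq, if_pos heq]
      · rw [if_neg heq, if_neg heq]
        by_cases hc : column < (line.getD (lo + width / 2) (0, 0)).2
        · rw [if_pos hc, if_pos hc]
          by_cases hh : width / 2 = 0
          · -- right becomes lo - 1 < lo: the loop stops; B stops with width 0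
            obtain ⟨f', rfl⟩ : ∃ f', f = f' + 1 := ⟨f - 1, by omega⟩
            rw [pvLoopA_stop line column f' _ _ (by omega), hh]
            simp [PySem.List.pyGetD_natCast, pvGoB_zero]
          · have h1 : ((lo + width / 2 : Nat) : Int) - 1 = (lo : Int) + ((width / 2 - 1 : Nat) : Int) := by
              omega
            rw [h1, ih (width / 2 - 1) lo (by omega) (by omega)]
        · rw [if_neg hc, if_neg hc]
          have h1 : ((lo + width / 2 : Nat) : Int) + 1 = ((lo + width / 2 + 1 : Nat) : Int) := by omega
          have h2 : (lo : Int) + (width : Int)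
              = ((lo + width / 2 + 1 : Nat) : Int) + ((width - width / 2 - 1 : Nat) : Int) := by omega
          rw [h1, h2, ih (width - width / 2 - 1) (lo + width / 2 + 1) (by omega) (by omega)]

-- ===== VERDICT (by name: the statement is the Claim_ definition above) =====
theorem get_index_of_insertion_spec : Claim_equal_get_index_of_insertion := by
  intro line column _
  unfold Spec_get_index_of_insertion get_index_of_insertion get_index_of_insertion_alt
  by_cases h : line.length = 0
  · simp [h]
  · have h1 : ¬ ((line.length : Int) = 0) := by exact_mod_cast h
    simp only [if_neg h1, if_neg h]
    have h2 := pvLoopA_eq_pvGoB line column line.length (line.length - 1) 0 (by omega) (by omega)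
    have h3 : ((0 : Nat) : Int) + ((line.length - 1 : Nat) : Int) = (line.length : Int) - 1 := by omega
    rw [h3] at h2
    simpa using h2
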